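-- pv_equiv track=rewrite | github.com/JJMLG/JJMLG | 2022년/09.05 ~ 09.18 그래프 응용 - 순한맛/B - 10472 십자뒤집기/동현.py | visitCode
-- ===== SOURCE A (Python) =====
-- def visitCode(pos):
--     code = ''
--     for i in range(3):
--         for j in range(3):
--             if pos[i][j] == '*':
--                 code += '1'
--             else:
--                 code += '0'
--     return int(code,2)
-- ===== SOURCE B (Python) =====
-- def visitCode(pos):
--     # weighted sum of set bits: bit (i,j) has weight 256 >> (3*i + j)
--     return sum(256 >> (3 * i + j)
--                for i in range(3) for j in range(3)
--                if pos[i][j] == '*')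
-- ===== Notes on version B (the rewrite author's own statement) =====
-- stated objective: simpler
-- what changed: Replaces the string accumulator plus int(code,2) re-parse with a direct sum of positional bit weights (256 >> (3*i+j)) over the starred cells, in one comprehension with no accumulator.
import Mathlib
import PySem

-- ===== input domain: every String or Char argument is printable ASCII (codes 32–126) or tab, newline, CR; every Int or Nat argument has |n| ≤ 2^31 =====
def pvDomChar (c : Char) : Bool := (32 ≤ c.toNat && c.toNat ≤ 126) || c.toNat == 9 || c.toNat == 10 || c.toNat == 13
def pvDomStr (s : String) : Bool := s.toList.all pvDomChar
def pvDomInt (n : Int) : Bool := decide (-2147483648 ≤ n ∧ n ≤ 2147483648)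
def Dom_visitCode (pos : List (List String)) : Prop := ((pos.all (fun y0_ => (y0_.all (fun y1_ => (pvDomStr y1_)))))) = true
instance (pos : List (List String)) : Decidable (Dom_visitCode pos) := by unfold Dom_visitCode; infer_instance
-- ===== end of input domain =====

-- B replaces A's string accumulator + int(code,2) re-parse by a direct sum of bit weights (simpler).

-- ===== PORT A =====
-- pos[i][j]: double Python indexing; out-of-range (excluded by Pre_) defaults are never reached under Pre_.
def pvCellA (pos : List (List String)) (i j : Int) : String :=
  (PySem.List.pyGet? ((PySem.List.pyGet? pos i).getD []) j).getD ""

def visitCode (pos : List (List String)) : Int :=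
  let code :=
    (PySem.List.pyRange 0 3 1).foldl (fun code i =>
      (PySem.List.pyRange 0 3 1).foldl (fun code j =>
        if pvCellA pos i j == "*" then code ++ "1" else code ++ "0") code) ""
  -- int(code, 2): hand port of the base-2 parse, exact on the '0'/'1' strings code always is
  code.toList.foldl (fun acc ch => acc * 2 + (if ch == '1' then 1 else 0)) 0

-- ===== PORT B =====
def visitCode_alt (pos : List (List String)) : Int :=
  ((PySem.List.pyRange 0 3 1).flatMap (fun i =>
    (PySem.List.pyRange 0 3 1).filterMap (fun j =>
      if pvCellA pos i j == "*"
      then some ((256 : Int) >>> (3 * i + j).toNat) else none))).sum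

-- ===== PRECONDITION & SPEC =====
-- A raises IndexError unless there are at least 3 rows and each of the first 3 rows has at least 3 entries.
def Pre_visitCode (pos : List (List String)) : Prop :=
  3 ≤ pos.length ∧ ∀ r ∈ pos.take 3, 3 ≤ r.length
instance (pos : List (List String)) : Decidable (Pre_visitCode pos) := by unfold Pre_visitCode; infer_instance

def pvWitness_visitCode : List (List String) :=
  [["*", ".", "*"], [".", "*", "."], ["*", ".", "*"]]

def Spec_visitCode (pos : List (List String)) (out : Int) : Prop := out = visitCode_alt pos
instance (pos : List (List String)) (out : Int) : Decidable (Spec_visitCode pos out) := by unfold Spec_visitCode; infer_instance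

-- ===== CLAIM (what is proved, stated in full; the proofs are below) =====
def Claim_equal_visitCode : Prop := ∀ (pos : List (List String)), Dom_visitCode pos → Pre_visitCode pos → Spec_visitCode pos (visitCode pos)

-- ===== LEMMAS AND PROOFS =====

-- three literal-index lookups pyGet? needs in this proof
theorem pvGetD3_0 {α : Type} (x0 x1 x2 : α) (t : List α) (d : α) :
    (PySem.List.pyGet? (x0 :: x1 :: x2 :: t) 0).getD d = x0 := by
  unfold PySem.List.pyGet? PySem.List.pyIdx?
  split_ifs <;> simp_all
  omega

theorem pvGetD3_1 {α : Type} (x0 x1 x2 : α) (t : List α) (d : α) :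
    (PySem.List.pyGet? (x0 :: x1 :: x2 :: t) 1).getD d = x1 := by
  unfold PySem.List.pyGet? PySem.List.pyIdx?
  split_ifs <;> simp_all
  omega

theorem pvGetD3_2 {α : Type} (x0 x1 x2 : α) (t : List α) (d : α) :
    (PySem.List.pyGet? (x0 :: x1 :: x2 :: t) 2).getD d = x2 := by
  unfold PySem.List.pyGet? PySem.List.pyIdx?
  split_ifs <;> simp_all
  omega

-- ===== VERDICT (by name: the statement is the Claim_ definition above) =====
set_option maxHeartbeats 4000000 in
theorem visitCode_spec : Claim_equal_visitCode := by
  intro pos _ hpre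
  obtain ⟨hlen, hrows⟩ := hpre
  match pos, hlen with
  | r0 :: r1 :: r2 :: rest, _ =>
    have h0 : 3 ≤ r0.length := hrows r0 (by simp)
    have h1 : 3 ≤ r1.length := hrows r1 (by simp)
    have h2 : 3 ≤ r2.length := hrows r2 (by simp)
    match r0, h0, r1, h1, r2, h2 with
    | a0 :: a1 :: a2 :: _, _, b0 :: b1 :: b2 :: _, _, c0 :: c1 :: c2 :: _, _ =>
      show _ = _
      have hr : PySem.List.pyRange 0 3 1 = [0, 1, 2] := by decide
      simp only [visitCode, visitCode_alt, pvCellA, hr, List.foldl_cons, List.foldl_nil,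
        List.flatMap_cons, List.flatMap_nil, List.filterMap_cons, List.filterMap_nil,
        pvGetD3_0, pvGetD3_1, pvGetD3_2]
      generalize (a0 == "*") = q0
      generalize (a1 == "*") = q1
      generalize (a2 == "*") = q2
      generalize (b0 == "*") = q3
      generalize (b1 == "*") = q4
      generalize (b2 == "*") = q5
      generalize (c0 == "*") = q6
      generalize (c1 == "*") = q7
      generalize (c2 == "*") = q8
      revert q0 q1 q2 q3 q4 q5 q6 q7 q8
      decide
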